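-- pv_equiv track=rewrite | github.com/frr149/vibe_books | etl/sources/openlibrary.py | _extract_isbn
-- ===== SOURCE A (Python) =====
-- def _extract_isbn(values: list[str]) -> tuple[str, str]:
--     isbn_13 = ""
--     isbn_10 = ""
--     for value in values:
--         token = "".join(char for char in value if char.isdigit() or char.upper() == "X")
--         if len(token) == 13 and not isbn_13:
--             isbn_13 = token
--         if len(token) == 10 and not isbn_10:
--             isbn_10 = token
--         if isbn_13 and isbn_10:
--             break
--     return isbn_13, isbn_10
-- ===== SOURCE B (Python) =====
-- def _clean(value: str) -> str:
--     return "".join(char for char in value if char.isdigit() or char.upper() == "X")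
--
--
-- def _extract_isbn(values: list[str]) -> tuple[str, str]:
--     isbn_13 = next((t for v in values if len(t := _clean(v)) == 13), "")
--     isbn_10 = next((t for v in values if len(t := _clean(v)) == 10), "")
--     return isbn_13, isbn_10
-- ===== Notes on version B (the rewrite author's own statement) =====
-- stated objective: simpler
-- what changed: Replaces A's single stateful loop (two accumulators, conditional overwrites and an early break) by two independent lazy first-match searches with next() over a shared cleaning helper.
import Mathlib
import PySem

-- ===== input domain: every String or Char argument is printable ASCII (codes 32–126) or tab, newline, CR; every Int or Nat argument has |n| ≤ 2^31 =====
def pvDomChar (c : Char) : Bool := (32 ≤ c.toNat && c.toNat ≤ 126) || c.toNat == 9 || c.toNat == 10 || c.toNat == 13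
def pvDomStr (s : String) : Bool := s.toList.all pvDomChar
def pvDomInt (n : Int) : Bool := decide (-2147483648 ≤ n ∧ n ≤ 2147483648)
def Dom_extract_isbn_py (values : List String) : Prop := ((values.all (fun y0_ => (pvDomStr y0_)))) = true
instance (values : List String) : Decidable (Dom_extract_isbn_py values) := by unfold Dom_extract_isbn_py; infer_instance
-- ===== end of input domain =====

-- B replaces A's single stateful loop (two accumulators and an early break) by two
-- independent lazy first-match searches over a shared cleaning helper (objective: simpler).


-- ===== PORT A =====
-- token = "".join(char for char in value if char.isdigit() or char.upper() == "X")
-- (exact on Dom: ASCII, where str.isdigit = Char.isDigit and char.upper() == 'X' = Char.toUpper)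
def pvClean (value : String) : String :=
  String.ofList (value.toList.filter (fun c => c.isDigit || c.toUpper == 'X'))

-- the for-loop with its two accumulators and the early break
def pvLoopA : List String → String → String → String × String
  | [], isbn13, isbn10 => (isbn13, isbn10)
  | value :: rest, isbn13, isbn10 =>
    let token := pvClean value
    let isbn13' := if PySem.Str.len token = 13 ∧ isbn13 = "" then token else isbn13
    let isbn10' := if PySem.Str.len token = 10 ∧ isbn10 = "" then token else isbn10
    if isbn13' ≠ "" ∧ isbn10' ≠ "" then (isbn13', isbn10')
    else pvLoopA rest isbn13' isbn10'

def extract_isbn_py (values : List String) : String × String :=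
  pvLoopA values "" ""

-- ===== PORT B =====
-- next((t for v in values if len(t := _clean(v)) == n), "")
def pvFindIsbn (n : Int) (values : List String) : String :=
  match values.find? (fun v => PySem.Str.len (pvClean v) == n) with
  | some v => pvClean v
  | none => ""

def extract_isbn_py_alt (values : List String) : String × String :=
  (pvFindIsbn 13 values, pvFindIsbn 10 values)

-- ===== PRECONDITION & SPEC =====
def Spec_extract_isbn_py (values : List String) (out : String × String) : Prop := out = extract_isbn_py_alt values
instance (values : List String) (out : String × String) : Decidable (Spec_extract_isbn_py values out) := by unfold Spec_extract_isbn_py; infer_instance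

-- ===== CLAIM (what is proved, stated in full; the proofs are below) =====
def Claim_equal_extract_isbn_py : Prop := ∀ (values : List String), Dom_extract_isbn_py values → Spec_extract_isbn_py values (extract_isbn_py values)

-- ===== LEMMAS AND PROOFS =====

lemma pvClean_len_ne (value : String) (n : Int) (hn : n ≠ 0)
    (h : ((pvClean value).length : Int) = n) : pvClean value ≠ "" := by
  intro he
  rw [he] at h
  simp at h
  omega

lemma pvFindIsbn_cons (n : Int) (v : String) (rest : List String) :
    pvFindIsbn n (v :: rest) =
      if ((pvClean v).length : Int) = n then pvClean v else pvFindIsbn n rest := by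
  by_cases h : ((pvClean v).length : Int) = n <;>
    simp [pvFindIsbn, PySem.Str.len_eq, h]

lemma pvLoopA_eq (values : List String) : ∀ (isbn13 isbn10 : String),
    pvLoopA values isbn13 isbn10 =
      ((if isbn13 = "" then pvFindIsbn 13 values else isbn13),
       (if isbn10 = "" then pvFindIsbn 10 values else isbn10)) := by
  induction values with
  | nil => intro i13 i10; simp [pvLoopA, pvFindIsbn]
  | cons v rest ih =>
    intro i13 i10
    simp only [pvLoopA, pvFindIsbn_cons]
    by_cases hA : ((pvClean v).length : Int) = 13
    · have hne : pvClean v ≠ "" := pvClean_len_ne v 13 (by norm_num) hA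
      have hB : ¬ ((pvClean v).length : Int) = 10 := by rw [hA]; norm_num
      by_cases h13 : i13 = "" <;> by_cases h10 : i10 = "" <;>
        simp [PySem.Str.len_eq, hA, h13, h10, hne, ih]
    · by_cases hB : ((pvClean v).length : Int) = 10
      · have hne : pvClean v ≠ "" := pvClean_len_ne v 10 (by norm_num) hB
        by_cases h13 : i13 = "" <;> by_cases h10 : i10 = "" <;>
          simp [PySem.Str.len_eq, hB, h13, h10, hne, ih]
      · by_cases h13 : i13 = "" <;> by_cases h10 : i10 = "" <;>
          simp [PySem.Str.len_eq, hA, hB, h13, h10, ih]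

-- ===== VERDICT (by name: the statement is the Claim_ definition above) =====
theorem extract_isbn_py_spec : Claim_equal_extract_isbn_py := by
  intro values _
  unfold Spec_extract_isbn_py extract_isbn_py extract_isbn_py_alt
  simp [pvLoopA_eq]
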